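-- pv_equiv track=rewrite | github.com/crdcj/PYield | pyield/rmd.py | _construir_grupos
-- ===== SOURCE A (Python) =====
-- def _construir_grupos(
--     eventos: list[tuple[int, str, str, str]],
-- ) -> dict[tuple[str, str], dict[str, int]]:
--     """Agrupa eventos por (grupo, subgrupo): {chave → {titulo → índice na matriz}}."""
--     grupos: dict[tuple[str, str], dict[str, int]] = {}
--     for idx, grupo, subgrupo, titulo in eventos:
--         chave = (grupo, subgrupo)
--         if chave not in grupos:
--             grupos[chave] = {}
--         grupos[chave][titulo] = idx
--     return grupos
-- ===== SOURCE B (Python) =====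
-- def _construir_grupos(
--     eventos: list[tuple[int, str, str, str]],
-- ) -> dict[tuple[str, str], dict[str, int]]:
--     """Agrupa eventos por (grupo, subgrupo): {chave -> {titulo -> indice na matriz}}."""
--     chaves = dict.fromkeys((g, s) for _, g, s, _ in eventos)
--     return {
--         ch: {t: i for i, g, s, t in eventos if (g, s) == ch}
--         for ch in chaves
--     }
-- ===== Notes on version B (the rewrite author's own statement) =====
-- stated objective: simpler
-- what changed: Replaces the incremental insert-and-check nested-dict build with a two-phase comprehension: collect the distinct (grupo,subgrupo) keys first (dict.fromkeys), then build each inner {titulo: idx} map by a per-key scan of the events.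
import Mathlib
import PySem

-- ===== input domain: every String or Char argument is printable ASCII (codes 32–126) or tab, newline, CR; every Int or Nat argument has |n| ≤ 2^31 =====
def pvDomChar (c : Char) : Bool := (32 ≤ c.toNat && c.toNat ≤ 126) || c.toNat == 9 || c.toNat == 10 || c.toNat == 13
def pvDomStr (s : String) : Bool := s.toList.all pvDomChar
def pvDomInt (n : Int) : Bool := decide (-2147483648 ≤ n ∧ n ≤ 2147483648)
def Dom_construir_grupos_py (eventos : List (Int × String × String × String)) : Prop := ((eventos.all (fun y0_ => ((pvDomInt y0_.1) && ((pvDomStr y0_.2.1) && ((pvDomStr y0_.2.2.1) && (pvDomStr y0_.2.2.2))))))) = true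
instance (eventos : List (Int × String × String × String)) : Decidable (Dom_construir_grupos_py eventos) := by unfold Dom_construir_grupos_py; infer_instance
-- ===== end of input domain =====

-- B replaces A's incremental insert-and-check nested-dict build by a two-phase comprehension
-- (distinct keys first, then one per-key scan building each inner map): simpler, not faster.


-- ===== PORT A =====
-- one loop iteration of A: ensure the key's inner dict exists, then set grupos[chave][titulo] = idx
-- (the in-place inner assignment is Dict.modify, exact here since chave was just ensured present)
def pvStepA (grupos : PySem.Dict (String × String) (PySem.Dict String Int))
    (e : Int × String × String × String) : PySem.Dict (String × String) (PySem.Dict String Int) :=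
  let chave := (e.2.1, e.2.2.1)
  let grupos := if grupos.contains chave then grupos else grupos.insert chave PySem.Dict.empty
  grupos.modify chave PySem.Dict.empty (fun inner => inner.insert e.2.2.2 e.1)

def construir_grupos_py (eventos : List (Int × String × String × String)) : List (String × String × List (String × Int)) :=
  ((eventos.foldl pvStepA PySem.Dict.empty).items).map (fun p => (p.1.1, p.1.2, p.2.items))

-- ===== PORT B =====
-- inner dict comprehension {t: i for i, g, s, t in eventos if (g, s) == ch}
def pvInnerB (eventos : List (Int × String × String × String)) (ch : String × String) : PySem.Dict String Int :=
  (eventos.filter (fun e => (e.2.1, e.2.2.1) == ch)).foldl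
    (fun d e => d.insert e.2.2.2 e.1) PySem.Dict.empty

def construir_grupos_py_alt (eventos : List (Int × String × String × String)) : List (String × String × List (String × Int)) :=
  (PySem.List.dedup (eventos.map (fun e => (e.2.1, e.2.2.1)))).map
    (fun ch => (ch.1, ch.2, (pvInnerB eventos ch).items))

-- ===== PRECONDITION & SPEC =====
def Spec_construir_grupos_py (eventos : List (Int × String × String × String)) (out : List (String × String × List (String × Int))) : Prop := out = construir_grupos_py_alt eventos
instance (eventos : List (Int × String × String × String)) (out : List (String × String × List (String × Int))) : Decidable (Spec_construir_grupos_py eventos out) := by unfold Spec_construir_grupos_py; infer_instance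

-- ===== CLAIM (what is proved, stated in full; the proofs are below) =====
def Claim_equal_construir_grupos_py : Prop := ∀ (eventos : List (Int × String × String × String)), Dom_construir_grupos_py eventos → Spec_construir_grupos_py eventos (construir_grupos_py eventos)

-- ===== LEMMAS AND PROOFS =====

-- the key extracted from an event
def pvKey (e : Int × String × String × String) : String × String := (e.2.1, e.2.2.1)

-- appending one event extends exactly the inner map of its key
lemma pvInnerB_append (xs : List (Int × String × String × String)) (e : Int × String × String × String)
    (ch : String × String) :
    pvInnerB (xs ++ [e]) ch =
      if pvKey e = ch then (pvInnerB xs ch).insert e.2.2.2 e.1 else pvInnerB xs ch := by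
  simp only [pvInnerB, pvKey, List.filter_append, List.filter_cons, List.filter_nil]
  by_cases h : (e.2.1, e.2.2.1) = ch
  · simp [h]
  · simp [h]

-- a key not among the events' keys has an empty inner map
lemma pvInnerB_of_not_mem (xs : List (Int × String × String × String)) (ch : String × String)
    (h : ch ∉ xs.map pvKey) : pvInnerB xs ch = PySem.Dict.empty := by
  have : xs.filter (fun e => (e.2.1, e.2.2.1) == ch) = [] := by
    rw [List.filter_eq_nil_iff]
    intro e he hbe
    exact h (List.mem_map.mpr ⟨e, he, by simpa [pvKey] using hbe⟩)
  simp [pvInnerB, this]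

-- distinct-keys list after appending one key
lemma pvDedup_append {A : Type} [BEq A] [LawfulBEq A] (m : List A) (k : A) :
    PySem.List.dedup (m ++ [k]) =
      if k ∈ m then PySem.List.dedup m else PySem.List.dedup m ++ [k] := by
  rw [PySem.List.dedup_eq_ofList, PySem.List.dedup_eq_ofList, PySem.Set.ofList_append,
    PySem.Set.update_cons, PySem.Set.update_nil, PySem.Set.add]
  by_cases h : k ∈ m
  · simp [PySem.Set.contains, PySem.Set.mem_ofList, h]
  · simp [PySem.Set.contains, PySem.Set.mem_ofList, h]

-- MAIN INVARIANT: the items of A's folded dict are B's key list paired with B's inner maps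
lemma pvMain (es : List (Int × String × String × String)) :
    (es.foldl pvStepA PySem.Dict.empty).items =
      (PySem.List.dedup (es.map pvKey)).map (fun ch => (ch, pvInnerB es ch)) := by
  induction es using List.reverseRecOn with
  | nil => rfl
  | append_singleton xs e ih =>
    rw [List.foldl_append, List.foldl_cons, List.foldl_nil]
    set d := xs.foldl pvStepA PySem.Dict.empty with hd
    have hkeys : d.keys = PySem.List.dedup (xs.map pvKey) := by
      show d.items.map (·.1) = _
      rw [ih, List.map_map,
        show ((fun x : (String × String) × PySem.Dict String Int => x.1) ∘
            fun ch => (ch, pvInnerB xs ch)) = id from rfl]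
      exact List.map_id _
    have hnd : d.keys.Nodup := by rw [hkeys]; exact PySem.List.nodup_dedup _
    rw [List.map_append, List.map_cons, List.map_nil, pvDedup_append]
    by_cases hmem : pvKey e ∈ xs.map pvKey
    · -- the key already exists: A overwrites the inner entry in place
      have hcont : d.contains (pvKey e) = true :=
        (PySem.Dict.contains_iff_mem_keys d _).mpr
          (by rw [hkeys]; exact (PySem.List.mem_dedup _ _).mpr hmem)
      have hin : (pvKey e, pvInnerB xs (pvKey e)) ∈ d.items := by
        rw [ih]
        exact List.mem_map.mpr ⟨pvKey e, (PySem.List.mem_dedup _ _).mpr hmem, rfl⟩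
      have hgd : d.getD (pvKey e) PySem.Dict.empty = pvInnerB xs (pvKey e) :=
        PySem.Dict.getD_of_mem_items d hin hnd _
      have hstep : pvStepA d e =
          d.insert (pvKey e) ((pvInnerB xs (pvKey e)).insert e.2.2.2 e.1) := by
        have hc' : d.contains (e.2.1, e.2.2.1) = true := hcont
        have hgd' : d.getD (e.2.1, e.2.2.1) PySem.Dict.empty = pvInnerB xs (pvKey e) := hgd
        simp only [pvStepA, PySem.Dict.modify, hc', if_true, hgd']
        rfl
      rw [hstep, PySem.Dict.items_insert_of_contains d _ hcont, ih, List.map_map, if_pos hmem]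
      apply List.map_congr_left
      intro c hc
      rw [pvInnerB_append]
      by_cases hce : c = pvKey e
      · simp [Function.comp, hce]
      · simp [Function.comp, hce, Ne.symm hce]
    · -- a fresh key: A appends a new entry with a fresh inner dict
      have hcont : d.contains (pvKey e) = false := by
        rw [PySem.Dict.contains_eq_decide_mem_keys, hkeys]
        simp [hmem]
      have hstep : pvStepA d e =
          d.insert (pvKey e) (PySem.Dict.empty.insert e.2.2.2 e.1) := by
        have hc' : d.contains (e.2.1, e.2.2.1) = false := hcont
        simp only [pvStepA, PySem.Dict.modify, hc', Bool.false_eq_true, if_false,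
          PySem.Dict.getD_insert_self, PySem.Dict.insert_insert_self]
        rfl
      rw [hstep, PySem.Dict.items_insert_of_not_contains d _ hcont, ih, if_neg hmem,
        List.map_append, List.map_cons, List.map_nil]
      congr 1
      · apply List.map_congr_left
        intro c hc
        have hne : pvKey e ≠ c := by
          intro h
          exact hmem (h ▸ (PySem.List.mem_dedup _ _).mp hc)
        rw [pvInnerB_append, if_neg hne]
      · rw [pvInnerB_append, if_pos rfl, pvInnerB_of_not_mem xs (pvKey e) hmem]

theorem construir_grupos_py_spec : Claim_equal_construir_grupos_py := by
  intro eventos _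
  unfold Spec_construir_grupos_py construir_grupos_py construir_grupos_py_alt
  rw [pvMain]
  rw [List.map_map]
  rfl
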